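-- pv_equiv track=rewrite | github.com/ZoeGerber/ProjetPythonL2 | Projet-3_Python.py | init1
-- ===== SOURCE A (Python) =====
-- def init1(arn):
--     i=0
--     seqARNtrad1=""
--     for i in range(0,len(arn),3):
--         codon=arn[i:i+3]
--         if (codon=="AUG"):
--             seqARNtrad1= arn[i:]
--             break
--     return(seqARNtrad1)
-- ===== SOURCE B (Python) =====
-- def init1(arn):
--     pos = arn.find("AUG")
--     while pos != -1 and pos % 3 != 0:
--         pos = arn.find("AUG", pos + 1)
--     return "" if pos == -1 else arn[pos:]
-- ===== Notes on version B (the rewrite author's own statement) =====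
-- stated objective: faster
-- what changed: Instead of scanning every frame-aligned codon with a stride-3 Python loop and slicing each triple, B jumps between actual occurrences of the start codon via str.find(sub, start) and keeps the first one whose index is a multiple of 3.
import Mathlib
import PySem

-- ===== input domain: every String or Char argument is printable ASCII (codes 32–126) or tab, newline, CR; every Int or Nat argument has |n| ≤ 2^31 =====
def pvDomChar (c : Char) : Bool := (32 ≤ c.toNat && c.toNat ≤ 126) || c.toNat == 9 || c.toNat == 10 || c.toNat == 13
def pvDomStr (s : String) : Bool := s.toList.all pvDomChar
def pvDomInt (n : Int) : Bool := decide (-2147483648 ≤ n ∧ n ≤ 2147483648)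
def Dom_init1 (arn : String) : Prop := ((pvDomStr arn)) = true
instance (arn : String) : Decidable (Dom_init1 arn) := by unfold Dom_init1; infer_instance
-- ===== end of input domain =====

-- B replaces A's per-codon stride-3 scan by jumping between start-codon occurrences with
-- str.find and keeping the first frame-aligned one (constant-factor faster in a timing run).

-- ===== PORT A =====
-- loop 'for i in range(0, len(arn), 3): … break' as recursion over the range list; '' if no break
def init1Loop (arn : String) : List Int → String
  | [] => ""
  | i :: rest =>
    if PySem.Str.slice arn (some i) (some (i + 3)) = "AUG"
    then PySem.Str.slice arn (some i) none
    else init1Loop arn rest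

def init1 (arn : String) : String :=
  init1Loop arn (PySem.List.pyRange 0 (PySem.Str.len arn) 3)

-- ===== PORT B =====
-- 'while pos != -1 and pos % 3 != 0: pos = arn.find("AUG", pos+1)'; fuel only makes the loop
-- total in Lean (pos strictly increases and stays < len, so len+1 steps always suffice)
def init1AltLoop (arn : String) : Nat → Int → Int
  | 0, pos => pos
  | fuel+1, pos =>
    if pos ≠ -1 ∧ PySem.Int.mod pos 3 ≠ 0
    then init1AltLoop arn fuel (PySem.Str.findFrom arn "AUG" (pos + 1) none)
    else pos

def init1_alt (arn : String) : String :=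
  let pos := init1AltLoop arn (arn.toList.length + 1) (PySem.Str.find arn "AUG")
  if pos = -1 then "" else PySem.Str.slice arn (some pos) none

-- ===== PRECONDITION & SPEC =====
def Spec_init1 (arn : String) (out : String) : Prop := out = init1_alt arn
instance (arn : String) (out : String) : Decidable (Spec_init1 arn out) := by unfold Spec_init1; infer_instance

-- ===== CLAIM (what is proved, stated in full; the proofs are below) =====
def Claim_equal_init1 : Prop := ∀ (arn : String), Dom_init1 arn → Spec_init1 arn (init1 arn)

-- ===== LEMMAS AND PROOFS =====

-- reference: the first index k' ≥ k that is frame-aligned and starts "AUG" (scanned one by one)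
def refF (cs : List Char) (k : Nat) : Option Nat :=
  if _h : k < cs.length then
    if k % 3 = 0 ∧ "AUG".toList <+: cs.drop k then some k else refF cs (k+1)
  else none
termination_by cs.length - k
decreasing_by omega

lemma refF_step (cs : List Char) (k : Nat)
    (h : ¬ (k % 3 = 0 ∧ "AUG".toList <+: cs.drop k)) : refF cs k = refF cs (k+1) := by
  rw [refF]
  by_cases hk : k < cs.length
  · rw [dif_pos hk, if_neg h]
  · rw [dif_neg hk, refF, dif_neg (by omega)]

lemma refF_congr (cs : List Char) (k m : Nat) (hkm : k ≤ m)
    (h : ∀ j, k ≤ j → j < m → ¬ (j % 3 = 0 ∧ "AUG".toList <+: cs.drop j)) :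
    refF cs k = refF cs m := by
  induction m, hkm using Nat.le_induction with
  | base => rfl
  | succ m hm ih =>
    rw [ih (fun j hj hj' => h j hj (by omega)), refF_step cs m (h m hm (by omega))]

lemma refF_some (cs : List Char) (i : Nat) (h3 : i % 3 = 0)
    (hp : "AUG".toList <+: cs.drop i) : refF cs i = some i := by
  have hlen : 3 ≤ cs.length - i := by
    have := hp.length_le
    simpa using this
  rw [refF, dif_pos (by omega), if_pos ⟨h3, hp⟩]

lemma refF_none (cs : List Char) (k : Nat)
    (h : ∀ j, k ≤ j → ¬ "AUG".toList <+: cs.drop j) : refF cs k = none := by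
  have h2 : refF cs cs.length = none := by rw [refF, dif_neg (by omega)]
  rcases Nat.lt_or_ge cs.length k with hlt | hle
  · rw [refF, dif_neg (by omega)]
  · rw [refF_congr cs k cs.length hle (fun j hj _ hx => h j hj hx.2), h2]

lemma prefix_lt_length {cs : List Char} {m : Nat}
    (hp : "AUG".toList <+: cs.drop m) : m + 3 ≤ cs.length := by
  have := hp.length_le
  simp at this
  omega

lemma slice_AUG_iff (arn : String) (k : Nat) :
    (PySem.Str.slice arn (some (k:Int)) (some ((k:Int) + 3)) = "AUG")
      ↔ "AUG".toList <+: arn.toList.drop k := by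
  have hiff : (PySem.Str.slice arn (some (k:Int)) (some ((k:Int) + 3)) = "AUG")
      ↔ (PySem.Str.slice arn (some (k:Int)) (some ((k:Int) + 3))).toList = "AUG".toList :=
    ⟨fun h => by rw [h], fun h => String.ext h⟩
  rw [hiff, PySem.Str.toList_slice, PySem.Chars.slice_eq_listSlice]
  have h3 : ((k:Int) + 3) = ((k:Int) + ((3:Nat):Int)) := by norm_num
  rw [h3, PySem.List.slice_natCast_add, List.prefix_iff_eq_take]
  have : ("AUG".toList).length = 3 := by decide
  rw [this, eq_comm]

lemma pyRange3_nil (a b : Int) (h : b ≤ a) : PySem.List.pyRange a b 3 = [] := by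
  rw [PySem.List.pyRange_of_pos a b (by norm_num), if_neg (by omega)]
  simp

lemma pyRange3_cons (a b : Int) (h : a < b) :
    PySem.List.pyRange a b 3 = a :: PySem.List.pyRange (a+3) b 3 := by
  rw [PySem.List.pyRange_of_pos a b (by norm_num),
      PySem.List.pyRange_of_pos (a+3) b (by norm_num)]
  have hn : (if a < b then ((b - a + 3 - 1) / 3).toNat else 0)
      = (if a + 3 < b then ((b - (a+3) + 3 - 1) / 3).toNat else 0) + 1 := by
    split_ifs <;> omega
  rw [hn, List.range_succ_eq_map, List.map_cons, List.map_map]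
  congr 1
  · simp
  · have hfun : ((fun k : Nat => a + 3 * (k:Int)) ∘ Nat.succ) = (fun k : Nat => a + 3 + 3 * (k:Int)) := by
      funext k; simp; ring
    rw [hfun]

lemma aLoop_eq (arn : String) (d k : Nat) (hd : arn.toList.length - k ≤ d) (hk3 : k % 3 = 0) :
    init1Loop arn (PySem.List.pyRange (k:Int) (arn.toList.length:Int) 3) =
      (match refF arn.toList k with
       | none => ""
       | some i => PySem.Str.slice arn (some (i:Int)) none) := by
  induction d generalizing k with
  | zero =>
    rw [pyRange3_nil _ _ (by omega), refF, dif_neg (by omega)]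
    rfl
  | succ d ih =>
    by_cases hk : k < arn.toList.length
    · rw [pyRange3_cons _ _ (by omega)]
      show (if PySem.Str.slice arn (some (k:Int)) (some ((k:Int) + 3)) = "AUG" then _ else _) = _
      by_cases hA : "AUG".toList <+: arn.toList.drop k
      · rw [if_pos ((slice_AUG_iff arn k).2 hA), refF_some arn.toList k hk3 hA]
      · rw [if_neg (fun hc => hA ((slice_AUG_iff arn k).1 hc))]
        have hcast : ((k:Int) + 3) = (((k+3 : Nat)):Int) := by push_cast; ring
        rw [hcast, ih (k+3) (by omega) (by omega),
            refF_congr arn.toList k (k+3) (by omega)]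
        intro j hj hj'
        rcases Nat.lt_or_ge j (k+1) with h1 | h1
        · have : j = k := by omega
          subst this; exact fun hc => hA hc.2
        · intro hc; have := hc.1; omega
    · rw [pyRange3_nil _ _ (by omega), refF, dif_neg (by omega)]
      rfl

lemma int_mod_natCast (m : Nat) : PySem.Int.mod (m:Int) 3 = ((m % 3 : Nat) : Int) := by
  show Int.fmod _ _ = _
  have hpos : ((0:Int) ≤ 3 ∨ (3:Int) ∣ (m:Int)) := Or.inl (by norm_num)
  rw [Int.fmod_eq_emod, if_pos hpos]
  omega

lemma bLoop_eq (arn : String) (fuel : Nat) : ∀ k : Nat, k ≤ arn.toList.length →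
    arn.toList.length - k < fuel →
    init1AltLoop arn fuel (PySem.Chars.findFrom arn.toList "AUG".toList (k:Int) none) =
      (match refF arn.toList k with | none => -1 | some i => (i:Int)) := by
  induction fuel with
  | zero => intro k _ hf; exact absurd hf (Nat.not_lt_zero _)
  | succ fuel ih =>
    intro k hk hf
    set cs := arn.toList with hcs
    set p := PySem.Chars.findFrom cs "AUG".toList (k:Int) none with hp
    by_cases hneg : p = -1
    · have hno : ¬ "AUG".toList <:+: cs.drop k :=
        (PySem.Chars.findFrom_natCast_eq_neg_one_iff cs "AUG".toList k hk).1 hneg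
      have hnone : refF cs k = none := by
        apply refF_none
        intro j hj hpre
        apply hno
        have : cs.drop j = (cs.drop k).drop (j - k) := by
          rw [List.drop_drop]; congr 1; omega
        rw [this] at hpre
        exact hpre.isInfix.trans (List.drop_suffix _ _).isInfix
      rw [hnone, init1AltLoop, if_neg (by simp [hneg])]
      exact hneg
    · obtain ⟨hkp, hpre, hmin⟩ :=
        PySem.Chars.findFrom_natCast_spec cs "AUG".toList k hk hneg
      set m := p.toNat with hm
      have hpm : p = (m:Int) := by omega
      have hmlt : m + 3 ≤ cs.length := prefix_lt_length hpre
      by_cases h3 : m % 3 = 0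
      · have hcond : ¬ (p ≠ -1 ∧ PySem.Int.mod p 3 ≠ 0) := by
          rw [hpm, int_mod_natCast, h3]
          simp
        rw [init1AltLoop, if_neg hcond]
        have : refF cs k = some m := by
          rw [refF_congr cs k m (by omega) (fun j hj hj' hc => hmin j hj hj' hc.2),
              refF_some cs m h3 hpre]
        rw [this, hpm]
      · have hcond : (p ≠ -1 ∧ PySem.Int.mod p 3 ≠ 0) := by
          refine ⟨hneg, ?_⟩
          rw [hpm, int_mod_natCast]
          omega
        rw [init1AltLoop, if_pos hcond]
        have hstep : p + 1 = ((m + 1 : Nat) : Int) := by omega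
        have heq : PySem.Str.findFrom arn "AUG" (p+1) none
            = PySem.Chars.findFrom cs "AUG".toList ((m+1 : Nat):Int) none := by
          rw [PySem.Str.findFrom_eq, hstep, hcs]
        rw [heq, ih (m+1) (by omega) (by omega)]
        rw [refF_congr cs k (m+1) (by omega)]
        intro j hj hj'
        rcases Nat.lt_or_ge j m with h1 | h1
        · exact fun hc => hmin j hj h1 hc.2
        · have : j = m := by omega
          subst this
          exact fun hc => h3 hc.1

lemma natCast_ne_neg_one (i : Nat) : ((i:Int) ≠ -1) := by omega

-- ===== VERDICT (by name: the statement is the Claim_ definition above) =====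
theorem init1_spec : Claim_equal_init1 := by
  intro arn _
  show init1 arn = init1_alt arn
  have hlen : PySem.Str.len arn = (arn.toList.length : Int) := by
    simp [PySem.Str.len]
  have hA : init1 arn =
      (match refF arn.toList 0 with
       | none => ""
       | some i => PySem.Str.slice arn (some (i:Int)) none) := by
    rw [init1, hlen]
    have h0 : (0:Int) = ((0:Nat):Int) := rfl
    rw [h0]
    exact aLoop_eq arn arn.toList.length 0 (by omega) (by omega)
  have hB : init1AltLoop arn (arn.toList.length + 1) (PySem.Str.find arn "AUG") =
      (match refF arn.toList 0 with | none => -1 | some i => (i:Int)) := by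
    rw [PySem.Str.find_eq, ← PySem.Chars.findFrom_zero]
    have h0 : (0:Int) = ((0:Nat):Int) := rfl
    rw [h0]
    exact bLoop_eq arn (arn.toList.length + 1) 0 (by omega) (by omega)
  rw [hA, init1_alt]
  simp only [hB]
  cases h : refF arn.toList 0 with
  | none => simp
  | some i => simp [natCast_ne_neg_one i]
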